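-- pv_equiv track=rewrite | github.com/mfdz/nvbw-osm-stop-comparison | osm_stop_matcher/OsmStopsImporter.py | extract_stop_mode
-- ===== SOURCE A (Python) =====
-- def extract_stop_mode(tags):
-- 	ordered_ref_keys= ["bus","train","tram","light_rail",]
-- 	first_occurrence = None
-- 	for key in ordered_ref_keys:
-- 		if key in tags and tags[key]=='yes':
-- 			if first_occurrence:
-- 				# if ambigous, rather return nothing than wrong
-- 				if first_occurrence == 'bus':
-- 					return None
-- 				else:
-- 					return 'trainish'
-- 			else:
-- 				first_occurrence = key
-- 	if first_occurrence:
-- 		return first_occurrence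
-- 	else:
-- 		if tags.get('highway') == 'bus_stop':
-- 			return 'bus'
-- 		elif tags.get('railway'):
-- 			return 'trainish'
-- ===== SOURCE B (Python) =====
-- _TABLE = {1: 'bus', 2: 'train', 4: 'tram', 8: 'light_rail',
--           6: 'trainish', 10: 'trainish', 12: 'trainish', 14: 'trainish'}
--
-- def extract_stop_mode(tags):
-- 	mask = ((tags.get('bus') == 'yes')
-- 		| (tags.get('train') == 'yes') << 1
-- 		| (tags.get('tram') == 'yes') << 2
-- 		| (tags.get('light_rail') == 'yes') << 3)
-- 	if mask:
-- 		return _TABLE.get(mask)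
-- 	if tags.get('highway') == 'bus_stop':
-- 		return 'bus'
-- 	if tags.get('railway'):
-- 		return 'trainish'
-- ===== Notes on version B (the rewrite author's own statement) =====
-- stated objective: alternative
-- what changed: B packs the four mode flags into a bitmask and answers by a precomputed 16-entry table lookup, instead of A's loop threading a first_occurrence accumulator with early returns.
import Mathlib
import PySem

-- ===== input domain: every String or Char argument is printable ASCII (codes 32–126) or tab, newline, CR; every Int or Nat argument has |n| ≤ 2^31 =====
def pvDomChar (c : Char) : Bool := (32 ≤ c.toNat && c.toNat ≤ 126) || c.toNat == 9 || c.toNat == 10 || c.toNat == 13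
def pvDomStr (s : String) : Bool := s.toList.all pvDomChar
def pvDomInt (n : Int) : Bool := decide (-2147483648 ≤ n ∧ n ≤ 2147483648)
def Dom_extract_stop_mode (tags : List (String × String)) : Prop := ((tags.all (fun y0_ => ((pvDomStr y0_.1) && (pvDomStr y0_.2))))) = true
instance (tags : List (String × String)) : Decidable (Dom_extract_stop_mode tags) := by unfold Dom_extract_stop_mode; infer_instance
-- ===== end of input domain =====

-- B packs the four mode flags into a bitmask and decides by a 16-entry table; A loops with an accumulator. Objective: alternative.

-- ===== PORT A =====
-- dict lookup (first match on the association list)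
def tagGet (tags : List (String × String)) (k : String) : Option String :=
  List.lookup k tags

-- the `highway`/`railway` fallback tail shared verbatim by Source A and Source B
def stopModeFallback (tags : List (String × String)) : Option String :=
  if tagGet tags "highway" == some "bus_stop" then some "bus"
  else match tagGet tags "railway" with
    | some v => if v == "" then none else some "trainish"   -- truthiness of the string
    | none => none

-- A's loop over ordered_ref_keys, carrying first_occurrence, with the early returns
def stopModeLoopA (tags : List (String × String)) : List String → Option String → Option String
  | [], first =>
    match first with
    | some f => some f
    | none => stopModeFallback tags
  | k :: ks, first =>
    if tagGet tags k == some "yes" then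
      match first with
      | some f => if f == "bus" then none else some "trainish"
      | none => stopModeLoopA tags ks (some k)
    else stopModeLoopA tags ks first

def extract_stop_mode (tags : List (String × String)) : Option String :=
  stopModeLoopA tags ["bus", "train", "tram", "light_rail"] none

-- ===== PORT B =====
-- Source B's _TABLE, keyed by the bitmask (absent keys → none, as _TABLE.get)
def stopModeTable (m : Nat) : Option String :=
  match m with
  | 1 => some "bus"
  | 2 => some "train"
  | 4 => some "tram"
  | 8 => some "light_rail"
  | 6 => some "trainish"
  | 10 => some "trainish"
  | 12 => some "trainish"
  | 14 => some "trainish"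
  | _ => none

def extract_stop_mode_alt (tags : List (String × String)) : Option String :=
  let mask : Nat :=
    (if tagGet tags "bus" == some "yes" then 1 else 0)
    ||| ((if tagGet tags "train" == some "yes" then 1 else 0) <<< 1)
    ||| ((if tagGet tags "tram" == some "yes" then 1 else 0) <<< 2)
    ||| ((if tagGet tags "light_rail" == some "yes" then 1 else 0) <<< 3)
  if mask ≠ 0 then stopModeTable mask
  else stopModeFallback tags

-- ===== PRECONDITION & SPEC =====
def Spec_extract_stop_mode (tags : List (String × String)) (out : Option String) : Prop := out = extract_stop_mode_alt tags
instance (tags : List (String × String)) (out : Option String) : Decidable (Spec_extract_stop_mode tags out) := by unfold Spec_extract_stop_mode; infer_instance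

-- ===== CLAIM =====
def Claim_equal_extract_stop_mode : Prop := ∀ (tags : List (String × String)), Dom_extract_stop_mode tags → Spec_extract_stop_mode tags (extract_stop_mode tags)

-- ===== LEMMAS AND PROOFS =====

-- ===== VERDICT =====
theorem extract_stop_mode_spec : Claim_equal_extract_stop_mode := by
  intro tags _
  unfold Spec_extract_stop_mode extract_stop_mode extract_stop_mode_alt
  by_cases h1 : (tagGet tags "bus" == some "yes") = true <;>
  by_cases h2 : (tagGet tags "train" == some "yes") = true <;>
  by_cases h3 : (tagGet tags "tram" == some "yes") = true <;>
  by_cases h4 : (tagGet tags "light_rail" == some "yes") = true <;>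
    simp [stopModeLoopA, stopModeTable, h1, h2, h3, h4]
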